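-- pv_equiv track=rewrite | github.com/toddstoffel/MongoSQL | src/utils/helpers.py | is_valid_mongodb_name
-- ===== SOURCE A (Python) =====
-- def is_valid_mongodb_name(name: str) -> bool:
--     """Check if a name is valid for MongoDB collection/database"""
--     if not name:
--         return False
--
--     # MongoDB names cannot contain certain characters
--     invalid_chars = ["/", "\\", ".", '"', "*", "<", ">", ":", "|", "?"]
--     for char in invalid_chars:
--         if char in name:
--             return False
--
--     # Cannot start with space or certain characters
--     if name.startswith(" ") or name.startswith("system."):
--         return False
--
--     return True
-- ===== SOURCE B (Python) =====
-- _INVALID = frozenset('/\\."*<>:|?')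
--
-- def is_valid_mongodb_name(name: str) -> bool:
--     """Check if a name is valid for MongoDB collection/database.
--
--     Single pass over the characters instead of ten substring scans; the
--     system-prefix check is dropped because any such name contains a dot
--     and is already rejected by the character test.
--     """
--     if not name:
--         return False
--     if name[0] == ' ':
--         return False
--     return all(c not in _INVALID for c in name)
-- ===== Notes on version B (the rewrite author's own statement) =====
-- stated objective: simpler
-- what changed: One pass over the characters against a frozenset of the ten forbidden characters (with an up-front leading-space check) replaces A's ten per-character substring scans and its redundant system-prefix test, which is unreachable because the dot it requires is itself a forbidden character.
import Mathlib
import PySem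

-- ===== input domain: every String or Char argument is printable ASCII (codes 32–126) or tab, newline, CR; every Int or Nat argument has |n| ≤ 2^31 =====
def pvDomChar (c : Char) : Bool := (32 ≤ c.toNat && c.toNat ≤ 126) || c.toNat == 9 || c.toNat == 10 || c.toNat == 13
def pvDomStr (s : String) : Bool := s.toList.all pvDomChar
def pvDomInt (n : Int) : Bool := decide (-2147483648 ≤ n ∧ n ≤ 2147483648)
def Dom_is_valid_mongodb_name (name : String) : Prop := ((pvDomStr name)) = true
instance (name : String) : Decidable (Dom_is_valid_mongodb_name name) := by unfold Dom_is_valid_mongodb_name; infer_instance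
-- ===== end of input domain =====

-- B replaces A's ten per-character substring scans with a single pass over the characters
-- against a set of forbidden characters, dropping A's unreachable system-prefix test
-- (the dot it requires is itself forbidden), for a simpler one-pass check.

-- ===== PORT A =====
def is_valid_mongodb_name (name : String) : Bool :=
  if name.toList.isEmpty then false
  else if (["/", "\\", ".", "\"", "*", "<", ">", ":", "|", "?"]).any
            (fun zch => PySem.Str.isIn zch name) then false
  else if PySem.Str.startswith name " " || PySem.Str.startswith name "system." then false
  else true

-- ===== PORT B =====
def pvInvalidChars : List Char := ['/', '\\', '.', '"', '*', '<', '>', ':', '|', '?']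

def is_valid_mongodb_name_alt (name : String) : Bool :=
  match name.toList with
  | [] => false
  | c :: _ =>
    if c == ' ' then false
    else name.toList.all (fun ch => !(pvInvalidChars.contains ch))

-- ===== PRECONDITION & SPEC =====
def Spec_is_valid_mongodb_name (name : String) (out : Bool) : Prop := out = is_valid_mongodb_name_alt name
instance (name : String) (out : Bool) : Decidable (Spec_is_valid_mongodb_name name out) := by unfold Spec_is_valid_mongodb_name; infer_instance

-- ===== CLAIM (what is proved, stated in full; the proofs are below) =====
def Claim_equal_is_valid_mongodb_name : Prop := ∀ (name : String), Dom_is_valid_mongodb_name name → Spec_is_valid_mongodb_name name (is_valid_mongodb_name name)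

-- ===== LEMMAS AND PROOFS =====

-- a one-character substring test is character membership
lemma chars_isIn_one (c : Char) (l : List Char) :
    PySem.Chars.isIn [c] l = l.contains c := by
  by_cases h : c ∈ l
  · rw [show l.contains c = true by simpa using h,
        (PySem.Chars.isIn_iff_infix _ _).mpr ((List.singleton_infix_iff c l).mpr h)]
  · rw [show l.contains c = false by simpa using h,
        (PySem.Chars.isIn_eq_false_iff _ _).mpr
          (fun hinf => h (hinf.subset (List.mem_singleton_self c)))]

-- startswith a one-character prefix looks only at the head
lemma chars_startswith_one (c x : Char) (t : List Char) :
    PySem.Chars.startswith (c :: t) [x] = (c == x) := by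
  by_cases hc : c = x
  · subst hc
    rw [(PySem.Chars.startswith_iff _ _).mpr (List.cons_prefix_cons.mpr ⟨rfl, List.nil_prefix⟩)]
    simp
  · rw [show (c == x) = false by simpa using hc]
    rw [← Bool.not_eq_true, PySem.Chars.startswith_iff _ _]
    intro hpre
    exact hc (List.cons_prefix_cons.mp hpre).1.symm

-- ===== VERDICT (by name: the statement is the Claim_ definition above) =====
theorem is_valid_mongodb_name_spec : Claim_equal_is_valid_mongodb_name := by
  intro name _
  unfold Spec_is_valid_mongodb_name is_valid_mongodb_name is_valid_mongodb_name_alt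
  cases hl : name.toList with
  | nil => simp
  | cons c rest =>
    simp only [hl, PySem.Str.isIn_eq, PySem.Str.startswith_eq, List.isEmpty_cons,
      show ("/" : String).toList = ['/'] from rfl,
      show ("\\" : String).toList = ['\\'] from rfl,
      show ("." : String).toList = ['.'] from rfl,
      show ("\"" : String).toList = ['"'] from rfl,
      show ("*" : String).toList = ['*'] from rfl,
      show ("<" : String).toList = ['<'] from rfl,
      show (">" : String).toList = ['>'] from rfl,
      show (":" : String).toList = [':'] from rfl,
      show ("|" : String).toList = ['|'] from rfl,
      show ("?" : String).toList = ['?'] from rfl,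
      show (" " : String).toList = [' '] from rfl,
      chars_isIn_one, List.any_cons, List.any_nil]
    by_cases hbad : ∃ z ∈ pvInvalidChars, z ∈ c :: rest
    · obtain ⟨z, hz, hm⟩ := hbad
      have hany : ((c :: rest).contains '/' || ((c :: rest).contains '\\' ||
          ((c :: rest).contains '.' || ((c :: rest).contains '"' ||
          ((c :: rest).contains '*' || ((c :: rest).contains '<' ||
          ((c :: rest).contains '>' || ((c :: rest).contains ':' ||
          ((c :: rest).contains '|' || ((c :: rest).contains '?' || false)))))))))) = true := by
        fin_cases hz <;> simp_all
      rw [hany]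
      have hall : (c :: rest).all (fun ch => !(pvInvalidChars.contains ch)) = false := by
        rw [Bool.eq_false_iff]
        intro hallt
        rw [List.all_eq_true] at hallt
        have := hallt z hm
        simp at this
        exact this hz
      rw [hall]
      simp
    · push Not at hbad
      have hnone : ∀ z ∈ pvInvalidChars, (c :: rest).contains z = false := by
        intro z hz; simpa using hbad z hz
      rw [hnone '/' (by decide), hnone '\\' (by decide), hnone '.' (by decide),
          hnone '"' (by decide), hnone '*' (by decide), hnone '<' (by decide),
          hnone '>' (by decide), hnone ':' (by decide), hnone '|' (by decide),
          hnone '?' (by decide)]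
      have hsys : PySem.Chars.startswith (c :: rest) ("system." : String).toList = false := by
        rw [← Bool.not_eq_true, PySem.Chars.startswith_iff _ _]
        intro hpre
        have hdot : '.' ∈ c :: rest := hpre.subset (by decide)
        exact hbad '.' (by decide) hdot
      rw [hsys, chars_startswith_one, Bool.or_false]
      have hall : (c :: rest).all (fun ch => !(pvInvalidChars.contains ch)) = true := by
        rw [List.all_eq_true]
        intro ch hch
        simp only [Bool.not_eq_eq_eq_not, Bool.not_true]
        simpa using fun hmem => hbad ch hmem hch
      rw [hall]
      cases c == ' ' <;> simp
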